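-- pv_equiv track=rewrite | github.com/VladErm-Data/python | dz_4.py | gen_cycle
-- ===== SOURCE A (Python) =====
-- import itertools as it
--
-- def gen_cycle(source_list,n):
--     block = 0
--     for i in it.cycle(source_list):
--         if block == n:
--             break
--         else:
--             yield i
--             block += 1
-- ===== SOURCE B (Python) =====
-- def gen_cycle(source_list, n):
--     if not source_list:
--         return
--     length = len(source_list)
--     for i in range(n):
--         yield source_list[i % length]
-- ===== Notes on version B (the rewrite author's own statement) =====
-- stated objective: idiomatic
-- what changed: Replaces the itertools.cycle iterator with a counter plus explicit modular indexing: an empty-list guard, then a single range(n) loop yielding source_list[i % len(source_list)].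
import Mathlib
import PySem

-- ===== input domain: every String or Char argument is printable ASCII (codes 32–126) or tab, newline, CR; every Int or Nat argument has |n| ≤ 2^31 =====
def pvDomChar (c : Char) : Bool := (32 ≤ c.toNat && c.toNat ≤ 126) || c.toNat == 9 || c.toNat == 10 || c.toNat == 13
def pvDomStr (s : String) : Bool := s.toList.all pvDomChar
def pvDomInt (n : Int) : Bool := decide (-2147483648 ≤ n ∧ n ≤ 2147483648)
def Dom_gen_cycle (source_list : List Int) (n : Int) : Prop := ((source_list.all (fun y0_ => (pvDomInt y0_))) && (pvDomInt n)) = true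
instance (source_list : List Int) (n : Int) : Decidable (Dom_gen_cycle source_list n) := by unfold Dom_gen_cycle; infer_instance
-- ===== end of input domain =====

-- B replaces A's itertools.cycle iterator by an explicit range(n) loop with modular
-- indexing (idiomatic); equivalence is about the list of yielded values.

-- ===== PORT A =====
-- A walks it.cycle(source_list) with a counter `block`, stopping when block == n.
-- The cursor through the current pass of the list is `cur`; when exhausted, cycle
-- restarts from the full list. Fuel n.toNat = remaining yields (block == n test).
def gen_cycle_go (src : List Int) : List Int → Nat → List Int
  | _, 0 => []
  | [], Nat.succ f =>
      match src with
      | [] => []                                   -- cycle([]) yields nothing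
      | y :: rest => y :: gen_cycle_go src rest f
  | x :: cur, Nat.succ f => x :: gen_cycle_go src cur f

def gen_cycle (source_list : List Int) (n : Int) : List Int :=
  gen_cycle_go source_list source_list n.toNat

-- ===== PORT B =====
def gen_cycle_alt (source_list : List Int) (n : Int) : List Int :=
  if source_list = [] then []
  else
    let length : Int := source_list.length
    (PySem.List.pyRange 0 n 1).map
      (fun i => PySem.List.pyGetD source_list (PySem.Int.mod i length) 0)

-- ===== PRECONDITION & SPEC =====
-- A never returns on a nonempty list with n < 0 (the generator yields forever,
-- `block == n` never holds); those inputs are excluded because A does not return there.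
def Pre_gen_cycle (source_list : List Int) (n : Int) : Prop :=
  source_list = [] ∨ 0 ≤ n
instance (source_list : List Int) (n : Int) : Decidable (Pre_gen_cycle source_list n) := by
  unfold Pre_gen_cycle; infer_instance

def pvWitness_gen_cycle : List Int × Int := ([3, 1, 4], 7)

def Spec_gen_cycle (source_list : List Int) (n : Int) (out : List Int) : Prop := out = gen_cycle_alt source_list n
instance (source_list : List Int) (n : Int) (out : List Int) : Decidable (Spec_gen_cycle source_list n out) := by unfold Spec_gen_cycle; infer_instance

-- ===== CLAIM (what is proved, stated in full; the proofs are below) =====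
def Claim_equal_gen_cycle : Prop := ∀ (source_list : List Int) (n : Int), Dom_gen_cycle source_list n → Pre_gen_cycle source_list n → Spec_gen_cycle source_list n (gen_cycle source_list n)

-- ===== LEMMAS AND PROOFS =====

-- Loop invariant for A's port: having consumed k elements of the current pass,
-- the next `fuel` yields are the modular-index reads starting at position k.
theorem gen_cycle_go_eq (src : List Int) (hsrc : src ≠ []) :
    ∀ (fuel k : Nat), k ≤ src.length →
      gen_cycle_go src (src.drop k) fuel
        = (List.range fuel).map (fun i => src.getD ((k + i) % src.length) 0) := by
  intro fuel
  induction fuel with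
  | zero => intro k hk; simp [gen_cycle_go]
  | succ f ih =>
    intro k hk
    rcases Nat.lt_or_ge k src.length with hlt | hge
    · rw [List.drop_eq_getElem_cons hlt, List.range_succ_eq_map]
      simp only [gen_cycle_go, List.map_cons, List.map_map]
      congr 1
      · rw [Nat.add_zero, Nat.mod_eq_of_lt hlt, List.getD_eq_getElem _ _ hlt]
      · rw [ih (k + 1) (by omega)]
        apply List.map_congr_left
        intro i _
        simp only [Function.comp_apply]
        have h2 : k + Nat.succ i = k + 1 + i := by omega
        rw [h2]
    · -- k = src.length : current pass exhausted, cycle restarts from the head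
      have hk' : k = src.length := le_antisymm hk hge
      subst hk'
      rw [List.drop_length]
      cases src with
      | nil => exact absurd rfl hsrc
      | cons y rest =>
        simp only [gen_cycle_go]
        rw [List.range_succ_eq_map]
        simp only [List.map_cons, List.map_map]
        congr 1
        · simp
        · have hih := ih 1 (by simp)
          simp only [List.drop_succ_cons, List.drop_zero] at hih
          rw [hih]
          apply List.map_congr_left
          intro i _
          simp only [Function.comp_apply]
          congr 1
          have h3 : (y :: rest).length + Nat.succ i
              = (y :: rest).length + (1 + i) := by omega
          rw [h3, Nat.add_mod_left]

-- B's port in closed form: a map over List.range n.toNat with Nat modular reads.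
theorem gen_cycle_alt_eq (src : List Int) (n : Int) (hsrc : src ≠ []) :
    gen_cycle_alt src n
      = (List.range n.toNat).map (fun i => src.getD (i % src.length) 0) := by
  unfold gen_cycle_alt
  rw [if_neg hsrc, PySem.List.pyRange_one]
  simp only [Int.sub_zero, List.map_map]
  apply List.map_congr_left
  intro i _
  simp only [Function.comp_apply, Int.zero_add]
  rw [PySem.Int.mod_natCast i src.length, PySem.List.pyGetD_natCast]

-- ===== VERDICT (by name: the statement is the Claim_ definition above) =====
theorem gen_cycle_spec : Claim_equal_gen_cycle := by
  intro src n _ hpre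
  unfold Spec_gen_cycle
  rcases eq_or_ne src [] with hnil | hsrc
  · subst hnil
    unfold gen_cycle gen_cycle_alt
    cases h : n.toNat with
    | zero => simp [gen_cycle_go]
    | succ f => simp [gen_cycle_go]
  · unfold gen_cycle
    rw [gen_cycle_alt_eq src n hsrc]
    have := gen_cycle_go_eq src hsrc n.toNat 0 (Nat.zero_le _)
    simpa using this
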